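-- pv_equiv track=rewrite | github.com/Bharath-Ganesh/summer_2025_leetcode | Dynamic_Programming/UnboundedKnapsack/CoinPermutation.py | coin_permutation
-- ===== SOURCE A (Python) =====
-- from typing import List
--
-- def coin_permutation(coins: List[int], amount: int) -> int:
--
--     dp = [0] * (amount + 1)
--     dp[0] = 1
--     for amt in range(1, amount + 1):
--         for coin in coins:
--             if amt >= coin:
--                 dp[amt] += dp[amt - coin]
--
--     return dp[amount]
-- ===== SOURCE B (Python) =====
-- def coin_permutation(coins, amount):
--     # demand-driven: mark which sub-amounts are actually reachable from `amount`
--     # by a descending sieve, then evaluate the counts only on those, sparsely in a dict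
--     needed = {amount}
--     for n in range(amount, 0, -1):
--         if n in needed:
--             for c in coins:
--                 if c <= n:
--                     needed.add(n - c)
--     ways = {0: 1}
--     for n in range(1, amount + 1):
--         if n in needed:
--             ways[n] = sum(ways[n - c] for c in coins if c <= n)
--     return ways[amount]
-- ===== Notes on version B (the rewrite author's own statement) =====
-- stated objective: faster
-- what changed: A fills a dense bottom-up dp array doing a full coin scan at every amount 1..amount; B is demand-driven: a descending sieve first marks which sub-amounts are actually reachable from `amount` by subtracting coins, then evaluates the counts sparsely in a dict over only those marked amounts.
-- outside the precondition, e.g. on coin_permutation([0], 1): A returns 0, B raises KeyError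
import Mathlib
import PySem

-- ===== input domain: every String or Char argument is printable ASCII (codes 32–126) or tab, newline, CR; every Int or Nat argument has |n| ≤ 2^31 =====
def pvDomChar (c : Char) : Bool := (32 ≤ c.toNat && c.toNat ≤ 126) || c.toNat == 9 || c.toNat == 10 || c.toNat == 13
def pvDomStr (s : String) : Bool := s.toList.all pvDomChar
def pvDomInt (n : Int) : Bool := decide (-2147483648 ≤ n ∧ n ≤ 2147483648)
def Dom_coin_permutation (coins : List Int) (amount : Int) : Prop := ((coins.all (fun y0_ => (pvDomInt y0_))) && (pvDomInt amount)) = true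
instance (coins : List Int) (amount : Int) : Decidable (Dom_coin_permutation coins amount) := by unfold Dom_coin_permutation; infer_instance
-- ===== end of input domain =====

-- B replaces A's dense bottom-up dp array over every amount by a demand-driven scheme:
-- a descending sieve marks the sub-amounts reachable from `amount`, then the counts are
-- evaluated sparsely in a dict over only the marked amounts.


-- ===== PORT A =====
-- dp[0] = 1 and the dp[amt] / dp[amt - coin] accesses are in range under Pre_ (Python raises
-- outside it, excluded); List.set / pyGetD are exact there.
def coin_permutation (coins : List Int) (amount : Int) : Int :=
  let dp0 : List Int := List.replicate (amount + 1).toNat 0      -- [0] * (amount + 1)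
  let dp1 := dp0.set 0 1                                          -- dp[0] = 1
  let dp := (PySem.List.pyRange 1 (amount + 1)).foldl (fun dp amt =>
      coins.foldl (fun dp coin =>
        if coin ≤ amt then                                        -- if amt >= coin
          dp.set amt.toNat
            (PySem.List.pyGetD dp amt 0 + PySem.List.pyGetD dp (amt - coin) 0)  -- dp[amt] += dp[amt - coin]
        else dp) dp) dp1
  PySem.List.pyGetD dp amount 0                                   -- return dp[amount]

-- ===== PORT B =====
-- the dict indexings ways[n - c] / ways[amount] are ported with getD 0: exact under Pre_,
-- where every looked-up key is present (Python raises KeyError only outside Pre_, excluded).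
def coin_permutation_alt (coins : List Int) (amount : Int) : Int :=
  let needed := (PySem.List.pyRange amount 0 (-1)).foldl (fun needed n =>  -- for n in range(amount, 0, -1)
      if n ∈ needed then                                          -- if n in needed
        coins.foldl (fun needed c =>
          if c ≤ n then PySem.Set.add needed (n - c) else needed) needed   -- needed.add(n - c)
      else needed)
    (PySem.Set.ofList [amount] : List Int)                        -- needed = {amount}
  let ways := (PySem.List.pyRange 1 (amount + 1)).foldl (fun ways n =>     -- for n in range(1, amount + 1)
      if n ∈ needed then                                          -- if n in needed
        ways.insert n
          (((coins.filter (fun c => c ≤ n)).map (fun c => ways.getD (n - c) 0)).sum)  -- ways[n] = sum(...)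
      else ways)
    ((PySem.Dict.empty : PySem.Dict Int Int).insert 0 1)          -- ways = {0: 1}
  ways.getD amount 0                                              -- return ways[amount]

-- ===== PRECONDITION & SPEC =====
-- Pre_ excludes inputs on which A raises IndexError (negative amount; a negative coin with
-- amount ≥ 1), and — for amount ≥ 1 — coin lists containing 0, where A's finite self-doubling
-- of dp[amt] is an accident of its in-place update and the natural B raises KeyError
-- (ways[n] is read inside the sum that defines it).
def Pre_coin_permutation (coins : List Int) (amount : Int) : Prop :=
  0 ≤ amount ∧ (amount = 0 ∨ ∀ c ∈ coins, 0 < c)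
instance (coins : List Int) (amount : Int) : Decidable (Pre_coin_permutation coins amount) := by
  unfold Pre_coin_permutation; infer_instance

def pvWitness_coin_permutation : List Int × Int := ([1, 2], 4)

def Spec_coin_permutation (coins : List Int) (amount : Int) (out : Int) : Prop := out = coin_permutation_alt coins amount
instance (coins : List Int) (amount : Int) (out : Int) : Decidable (Spec_coin_permutation coins amount out) := by unfold Spec_coin_permutation; infer_instance

-- ===== CLAIM (what is proved, stated in full; the proofs are below) =====
def Claim_equal_coin_permutation : Prop := ∀ (coins : List Int) (amount : Int), Dom_coin_permutation coins amount → Pre_coin_permutation coins amount → Spec_coin_permutation coins amount (coin_permutation coins amount)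

-- ===== LEMMAS AND PROOFS =====

-- the common value both programs compute: Cval coins n = number of ordered coin
-- sequences summing to n (for positive coins)
def Cval (coins : List Int) (n : Nat) : Int :=
  if hn : n = 0 then 1
  else (coins.attach.map (fun c =>
      if h : 1 ≤ c.1 ∧ c.1 ≤ (n : Int) then Cval coins (n - c.1.toNat) else 0)).sum
termination_by n
decreasing_by omega

lemma Cval_zero (coins : List Int) : Cval coins 0 = 1 := by simp [Cval]

lemma Cval_succ (coins : List Int) (n : Nat) (hn : n ≠ 0) (hpos : ∀ c ∈ coins, 0 < c) :
    Cval coins n =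
      (coins.map (fun c => if c ≤ (n : Int) then Cval coins (n - c.toNat) else 0)).sum := by
  rw [Cval, dif_neg hn]
  have h1 : (coins.attach.map (fun c =>
      if h : 1 ≤ c.1 ∧ c.1 ≤ (n : Int) then Cval coins (n - c.1.toNat) else 0))
      = coins.attach.map (fun c => if c.1 ≤ (n : Int) then Cval coins (n - c.1.toNat) else 0) := by
    apply List.map_congr_left
    intro c _
    have hc : 0 < c.1 := hpos c.1 c.2
    by_cases hle : c.1 ≤ (n : Int)
    · rw [dif_pos ⟨by omega, hle⟩, if_pos hle]
    · rw [dif_neg (fun hh => hle hh.2), if_neg hle]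
  rw [h1]
  exact congrArg List.sum (List.attach_map_val (l := coins)
    (f := fun x : Int => if x ≤ (n : Int) then Cval coins (n - x.toNat) else 0))

lemma mapRange_getD (g : Nat → Int) (L k : Nat) (hk : k < L) :
    ((List.range L).map g).getD k 0 = g k := by
  rw [List.getD_eq_getElem?_getD]
  simp [List.getElem?_map, List.getElem?_range hk]

-- ---------- A side ----------

-- the state of A's dp table after rows 1..m have been filled
def tbl (coins : List Int) (N m : Nat) : List Int :=
  (List.range (N + 1)).map (fun k => if k ≤ m then Cval coins k else 0)

lemma tbl_getD (coins : List Int) (N m k : Nat) (hk : k ≤ N) :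
    (tbl coins N m).getD k 0 = if k ≤ m then Cval coins k else 0 := by
  simpa [tbl] using mapRange_getD (fun k => if k ≤ m then Cval coins k else 0) (N + 1) k (by omega)

lemma tbl_zero (coins : List Int) (N : Nat) :
    (List.replicate (N + 1) (0 : Int)).set 0 1 = tbl coins N 0 := by
  apply List.ext_getElem (by simp [tbl])
  intro k hk hk2
  simp only [tbl, List.getElem_set, List.getElem_replicate, List.getElem_map, List.getElem_range]
  rcases Nat.eq_zero_or_pos k with h | h
  · simp [h, Cval_zero]
  · simp [Nat.pos_iff_ne_zero.mp h]
    omega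

lemma tbl_succ (coins : List Int) (N m : Nat) (hm : m + 1 ≤ N) :
    (tbl coins N m).set (m + 1) (Cval coins (m + 1)) = tbl coins N (m + 1) := by
  apply List.ext_getElem (by simp [tbl])
  intro k hk hk2
  simp only [tbl, List.getElem_set, List.getElem_map, List.getElem_range]
  by_cases h : m + 1 = k
  · simp [← h]
  · rw [if_neg h]
    by_cases h2 : k ≤ m
    · rw [if_pos h2, if_pos (by omega)]
    · rw [if_neg h2, if_neg (by omega)]

lemma set_getD_self (l : List Int) (a : Nat) : l.set a (l.getD a 0) = l := by
  apply List.ext_getElem (by simp)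
  intro k hk hk2
  rw [List.getElem_set]
  split
  · next he => subst he; rw [List.getD_eq_getElem?_getD]; simp [List.getElem?_eq_getElem hk2]
  · rfl

lemma getD_set_self (l : List Int) (a : Nat) (v : Int) (h : a < l.length) :
    (l.set a v).getD a 0 = v := by
  simp [List.getD_eq_getElem?_getD, h]

lemma getD_set_ne (l : List Int) (a b : Nat) (v : Int) (h : ¬ (a = b)) :
    (l.set a v).getD b 0 = l.getD b 0 := by
  simp [List.getD_eq_getElem?_getD, List.getElem?_set_ne h]

-- A's inner coin loop writes only index a and reads only strictly smaller indices
lemma A_inner (a : Nat) (ha1 : 1 ≤ a) :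
    ∀ (cs : List Int), (∀ c ∈ cs, 0 < c) → ∀ (dp : List Int), a < dp.length →
      cs.foldl (fun dp coin =>
          if coin ≤ ((a : Nat) : Int) then
            dp.set ((a : Nat) : Int).toNat
              (PySem.List.pyGetD dp ((a : Nat) : Int) 0 +
               PySem.List.pyGetD dp (((a : Nat) : Int) - coin) 0)
          else dp) dp
      = dp.set a (dp.getD a 0 +
          (cs.map (fun c => if c ≤ (a : Int) then dp.getD (a - c.toNat) 0 else 0)).sum) := by
  intro cs
  induction cs with
  | nil =>
    intro _ dp hlen
    simpa using (set_getD_self dp a).symm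
  | cons c cs ih =>
    intro hpos dp hlen
    rw [List.foldl_cons]
    by_cases hc : c ≤ (a : Int)
    · rw [if_pos hc]
      have hcpos : 0 < c := hpos c (by simp)
      have hread : PySem.List.pyGetD dp ((a : Nat) : Int) 0 = dp.getD a 0 := by
        rw [PySem.List.pyGetD_natCast]
      have hsub : (((a : Nat) : Int) - c).toNat = a - c.toNat := by omega
      have hread2 : PySem.List.pyGetD dp (((a : Nat) : Int) - c) 0 = dp.getD (a - c.toNat) 0 := by
        rw [PySem.List.pyGetD_of_nonneg dp 0 (by omega), hsub]
      rw [hread, hread2, Int.toNat_natCast]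
      set v := dp.getD a 0 + dp.getD (a - c.toNat) 0 with hv
      simp only [Int.toNat_natCast] at ih
      rw [ih (fun x hx => hpos x (by simp [hx])) (dp.set a v) (by simpa using hlen)]
      rw [List.set_set]
      have h1 : (dp.set a v).getD a 0 = v := getD_set_self dp a v hlen
      have h2 : (cs.map (fun c' => if c' ≤ (a : Int) then (dp.set a v).getD (a - c'.toNat) 0 else 0))
              = cs.map (fun c' => if c' ≤ (a : Int) then dp.getD (a - c'.toNat) 0 else 0) := by
        apply List.map_congr_left
        intro c' hc'
        have : 0 < c' := hpos c' (by simp [hc'])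
        by_cases hle : c' ≤ (a : Int)
        · rw [if_pos hle, if_pos hle, getD_set_ne dp a (a - c'.toNat) v (by omega)]
        · rw [if_neg hle, if_neg hle]
      rw [h1, h2, List.map_cons, List.sum_cons, if_pos hc]
      congr 1
      rw [hv, add_assoc]
    · rw [if_neg hc]
      rw [ih (fun x hx => hpos x (by simp [hx])) dp hlen]
      rw [List.map_cons, List.sum_cons, if_neg hc, zero_add]

-- A's outer loop fills the table row by row
lemma A_outer (coins : List Int) (N : Nat) (hpos : ∀ c ∈ coins, 0 < c) :
    ∀ m, m ≤ N →
      ((List.range m).map (fun k : Nat => (1 : Int) + (k : Int))).foldl (fun dp amt =>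
          coins.foldl (fun dp coin =>
            if coin ≤ amt then
              dp.set amt.toNat
                (PySem.List.pyGetD dp amt 0 + PySem.List.pyGetD dp (amt - coin) 0)
            else dp) dp) (tbl coins N 0)
      = tbl coins N m := by
  intro m
  induction m with
  | zero => intro _; simp
  | succ m ih =>
    intro hm
    rw [List.range_succ, List.map_append, List.foldl_append, ih (by omega)]
    simp only [List.map_cons, List.map_nil, List.foldl_cons, List.foldl_nil]
    have hamt : (1 : Int) + (m : Int) = (((m + 1 : Nat)) : Int) := by push_cast; ring
    rw [hamt]
    rw [A_inner (m + 1) (by omega) coins hpos (tbl coins N m) (by simp [tbl]; omega)]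
    have hg : (tbl coins N m).getD (m + 1) 0 = 0 := by
      rw [tbl_getD coins N m (m + 1) (by omega)]
      simp
    have hmap : (coins.map (fun c => if c ≤ ((m + 1 : Nat) : Int) then (tbl coins N m).getD (m + 1 - c.toNat) 0 else 0))
        = coins.map (fun c => if c ≤ ((m + 1 : Nat) : Int) then Cval coins (m + 1 - c.toNat) else 0) := by
      apply List.map_congr_left
      intro c hc
      have hcpos : 0 < c := hpos c hc
      by_cases hle : c ≤ ((m + 1 : Nat) : Int)
      · rw [if_pos hle, if_pos hle, tbl_getD coins N m (m + 1 - c.toNat) (by omega)]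
        rw [if_pos (by omega)]
      · rw [if_neg hle, if_neg hle]
    rw [hg, hmap, zero_add, ← Cval_succ coins (m + 1) (by omega) hpos]
    exact tbl_succ coins N m hm

lemma A_val (coins : List Int) (amount : Int) (h0 : 0 ≤ amount) (hpos : ∀ c ∈ coins, 0 < c) :
    coin_permutation coins amount = Cval coins amount.toNat := by
  unfold coin_permutation
  simp only []
  have hN : (amount + 1).toNat = amount.toNat + 1 := by omega
  rw [hN, tbl_zero coins amount.toNat, PySem.List.pyRange_one]
  have hR : (amount + 1 - 1).toNat = amount.toNat := by omega
  rw [hR]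
  rw [A_outer coins amount.toNat hpos amount.toNat (le_refl _)]
  rw [PySem.List.pyGetD_of_nonneg _ _ h0]
  rw [tbl_getD coins amount.toNat amount.toNat amount.toNat (le_refl _), if_pos (le_refl _)]

-- ---------- B side ----------

-- invariant of B's descending marking loop: amount is marked, marks lie in [0, amount],
-- and every mark above the loop counter ℓ is closed under subtracting an applicable coin
def SInv (coins : List Int) (amount ℓ : Int) (S : List Int) : Prop :=
  amount ∈ S ∧ (∀ n ∈ S, 0 ≤ n ∧ n ≤ amount) ∧
  (∀ n ∈ S, ℓ < n → ∀ c ∈ coins, c ≤ n → (n - c) ∈ S)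

-- membership after the inner marking loop over the coins
lemma B_mark_mem (n : Int) :
    ∀ (cs : List Int) (S : List Int) (x : Int),
      x ∈ cs.foldl (fun S c => if c ≤ n then PySem.Set.add S (n - c) else S) S
        ↔ x ∈ S ∨ ∃ c ∈ cs, c ≤ n ∧ x = n - c := by
  intro cs
  induction cs with
  | nil => intro S x; simp
  | cons c cs ih =>
    intro S x
    rw [List.foldl_cons]
    by_cases hc : c ≤ n
    · rw [if_pos hc, ih]
      rw [PySem.Set.mem_add]
      constructor
      · rintro (⟨h | h⟩ | ⟨c', hc', hle, he⟩)
        · exact Or.inl h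
        · exact Or.inr ⟨c, by simp, hc, h⟩
        · exact Or.inr ⟨c', by simp [hc'], hle, he⟩
      · rintro (h | ⟨c', hc', hle, he⟩)
        · exact Or.inl (Or.inl h)
        · rcases List.mem_cons.1 hc' with h' | h'
          · exact Or.inl (Or.inr (by rw [he, h']))
          · exact Or.inr ⟨c', h', hle, he⟩
    · rw [if_neg hc, ih]
      constructor
      · rintro (h | ⟨c', hc', hle, he⟩)
        · exact Or.inl h
        · exact Or.inr ⟨c', by simp [hc'], hle, he⟩
      · rintro (h | ⟨c', hc', hle, he⟩)
        · exact Or.inl h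
        · rcases List.mem_cons.1 hc' with h' | h'
          · exact absurd (h' ▸ hle) hc
          · exact Or.inr ⟨c', h', hle, he⟩

-- one step of the descending loop lowers the closure level by one
lemma B_mark_step (coins : List Int) (amount ℓ : Int) (S : List Int)
    (hpos : ∀ c ∈ coins, 0 < c) (hℓ : 1 ≤ ℓ) (hinv : SInv coins amount ℓ S) :
    SInv coins amount (ℓ - 1)
      (if ℓ ∈ S then
        coins.foldl (fun S c => if c ≤ ℓ then PySem.Set.add S (ℓ - c) else S) S
      else S) := by
  obtain ⟨hmem, hbd, hcl⟩ := hinv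
  by_cases hin : ℓ ∈ S
  · rw [if_pos hin]
    refine ⟨(B_mark_mem ℓ coins S amount).2 (Or.inl hmem), ?_, ?_⟩
    · intro n hn
      rcases (B_mark_mem ℓ coins S n).1 hn with h | ⟨c, hc, hle, he⟩
      · exact hbd n h
      · have := hpos c hc
        have := (hbd ℓ hin).2
        omega
    · intro n hn hgt c hc hle
      rcases (B_mark_mem ℓ coins S n).1 hn with h | ⟨c', hc', hle', he⟩
      · by_cases hne : ℓ < n
        · exact (B_mark_mem ℓ coins S (n - c)).2 (Or.inl (hcl n h hne c hc hle))
        · have hn_eq : n = ℓ := by omega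
          exact (B_mark_mem ℓ coins S (n - c)).2 (Or.inr ⟨c, hc, hn_eq ▸ hle, by rw [hn_eq]⟩)
      · have := hpos c' hc'
        omega
  · rw [if_neg hin]
    refine ⟨hmem, hbd, ?_⟩
    intro n hn hgt c hc hle
    by_cases hne : ℓ < n
    · exact hcl n hn hne c hc hle
    · have : n = ℓ := by omega
      exact absurd (this ▸ hn) hin

-- running the descending loop from level k down to 1 yields full closure
lemma B_mark_all (coins : List Int) (amount : Int) (hpos : ∀ c ∈ coins, 0 < c) :
    ∀ (k : Nat) (S : List Int), SInv coins amount (k : Int) S →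
      SInv coins amount 0
        ((PySem.List.pyRange (k : Int) 0 (-1)).foldl (fun S n =>
          if n ∈ S then
            coins.foldl (fun S c => if c ≤ n then PySem.Set.add S (n - c) else S) S
          else S) S) := by
  intro k
  induction k with
  | zero =>
    intro S hinv
    rw [PySem.List.pyRange_neg_one_eq_nil (by omega)]
    simpa using hinv
  | succ k ih =>
    intro S hinv
    rw [PySem.List.pyRange_neg_one_cons (by exact_mod_cast Nat.succ_pos k)]
    rw [List.foldl_cons]
    have hstep := B_mark_step coins amount ((k + 1 : Nat) : Int) S hpos (by omega) hinv
    have hcast : ((k + 1 : Nat) : Int) - 1 = (k : Int) := by push_cast; ring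
    rw [hcast] at hstep
    have hlist : ((k + 1 : Nat) : Int) - 1 = (k : Int) := hcast
    simpa [hlist] using ih _ hstep

-- a sum over a filtered list as a sum of guarded terms over the whole list
lemma sum_filter_ite (p : Int → Prop) [DecidablePred p] (f : Int → Int) :
    ∀ (l : List Int),
      ((l.filter (fun c => decide (p c))).map f).sum
        = (l.map (fun c => if p c then f c else 0)).sum := by
  intro l
  induction l with
  | nil => simp
  | cons c l ih =>
    by_cases hc : p c
    · simp [List.filter_cons, hc, ih]
    · simp [List.filter_cons, hc, ih]

-- the state of B's evaluation dict after amounts 1..m have been considered: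
-- exactly 0 and the marked amounts in [1, m] are present, each with its count
lemma B_eval (coins : List Int) (amount : Int) (S : List Int)
    (hpos : ∀ c ∈ coins, 0 < c)
    (hbd : ∀ n ∈ S, 0 ≤ n ∧ n ≤ amount)
    (hcl : ∀ n ∈ S, 0 < n → ∀ c ∈ coins, c ≤ n → (n - c) ∈ S) :
    ∀ (m : Nat) (k : Int),
      (((List.range m).map (fun j : Nat => (1 : Int) + (j : Int))).foldl (fun ways n =>
          if n ∈ S then
            ways.insert n
              (((coins.filter (fun c => c ≤ n)).map (fun c => ways.getD (n - c) 0)).sum)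
          else ways)
        ((PySem.Dict.empty : PySem.Dict Int Int).insert 0 1)).get? k
      = if k = 0 ∨ (k ∈ S ∧ 1 ≤ k ∧ k ≤ (m : Int)) then some (Cval coins k.toNat) else none := by
  intro m
  induction m with
  | zero =>
    intro k
    simp only [List.range_zero, List.map_nil, List.foldl_nil]
    rw [PySem.Dict.get?_insert]
    by_cases hk : k = 0
    · rw [if_pos hk, if_pos (Or.inl hk), hk]
      simp [Cval_zero]
    · rw [if_neg hk, PySem.Dict.get?_empty, if_neg]
      rintro (h | ⟨_, h1, h2⟩)
      · exact hk h
      · omega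
  | succ m ih =>
    intro k
    rw [List.range_succ, List.map_append, List.foldl_append]
    simp only [List.map_cons, List.map_nil, List.foldl_cons, List.foldl_nil]
    set n : Int := (1 : Int) + (m : Int) with hn
    have hn1 : n = ((m + 1 : Nat) : Int) := by push_cast [hn]; ring
    by_cases hS : n ∈ S
    · rw [if_pos hS]
      rw [PySem.Dict.get?_insert]
      have hsum :
          (((coins.filter (fun c => c ≤ n)).map (fun c =>
            (((List.range m).map (fun j : Nat => (1 : Int) + (j : Int))).foldl (fun ways n =>
              if n ∈ S then
                ways.insert n
                  (((coins.filter (fun c => c ≤ n)).map (fun c => ways.getD (n - c) 0)).sum)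
              else ways)
            ((PySem.Dict.empty : PySem.Dict Int Int).insert 0 1)).getD (n - c) 0)).sum)
          = Cval coins (m + 1) := by
        have hstep : ∀ c ∈ coins, c ≤ n →
            (((List.range m).map (fun j : Nat => (1 : Int) + (j : Int))).foldl (fun ways n =>
              if n ∈ S then
                ways.insert n
                  (((coins.filter (fun c => c ≤ n)).map (fun c => ways.getD (n - c) 0)).sum)
              else ways)
            ((PySem.Dict.empty : PySem.Dict Int Int).insert 0 1)).getD (n - c) 0
            = Cval coins ((m + 1) - c.toNat) := by
          intro c hc hle
          have hcpos : 0 < c := hpos c hc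
          have hmemS : (n - c) ∈ S ∨ n - c = 0 := by
            by_cases h0 : n - c = 0
            · exact Or.inr h0
            · exact Or.inl (hcl n hS (by omega) c hc hle)
          rw [PySem.Dict.getD_eq_get?_getD, ih (n - c)]
          have hcond : (n - c = 0 ∨ ((n - c) ∈ S ∧ 1 ≤ n - c ∧ n - c ≤ (m : Int))) := by
            rcases hmemS with h | h
            · by_cases h0 : n - c = 0
              · exact Or.inl h0
              · exact Or.inr ⟨h, by omega, by omega⟩
            · exact Or.inl h
          rw [if_pos hcond]
          have : (n - c).toNat = (m + 1) - c.toNat := by omega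
          rw [this]
          rfl
        calc ((coins.filter (fun c => c ≤ n)).map (fun c =>
                (((List.range m).map (fun j : Nat => (1 : Int) + (j : Int))).foldl (fun ways n =>
                  if n ∈ S then
                    ways.insert n
                      (((coins.filter (fun c => c ≤ n)).map (fun c => ways.getD (n - c) 0)).sum)
                  else ways)
                ((PySem.Dict.empty : PySem.Dict Int Int).insert 0 1)).getD (n - c) 0)).sum
            = ((coins.filter (fun c => c ≤ n)).map (fun c => Cval coins ((m + 1) - c.toNat))).sum := by
              apply congrArg List.sum
              apply List.map_congr_left
              intro c hcf
              exact hstep c (List.mem_of_mem_filter hcf)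
                (by simpa using (List.of_mem_filter hcf))
          _ = (coins.map (fun c => if c ≤ n then Cval coins ((m + 1) - c.toNat) else 0)).sum := by
              have := sum_filter_ite (fun c => c ≤ n) (fun c => Cval coins ((m + 1) - c.toNat)) coins
              simpa using this
          _ = Cval coins (m + 1) := by
              rw [Cval_succ coins (m + 1) (by omega) hpos, hn1]
      by_cases hk : k = n
      · rw [if_pos hk, hsum, if_pos (Or.inr ⟨hk ▸ hS, by omega, by omega⟩)]
        have : k.toNat = m + 1 := by omega
        rw [this]
      · rw [if_neg hk, ih k]
        have hiff : (k = 0 ∨ (k ∈ S ∧ 1 ≤ k ∧ k ≤ (m : Int)))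
            ↔ (k = 0 ∨ (k ∈ S ∧ 1 ≤ k ∧ k ≤ ((m + 1 : Nat) : Int))) := by
          constructor
          · rintro (h | ⟨h1, h2, h3⟩)
            · exact Or.inl h
            · exact Or.inr ⟨h1, h2, by push_cast; omega⟩
          · rintro (h | ⟨h1, h2, h3⟩)
            · exact Or.inl h
            · refine Or.inr ⟨h1, h2, ?_⟩
              have hkn : k ≠ n := hk
              rw [hn1] at hkn
              push_cast at h3 ⊢
              omega
        rw [if_congr hiff rfl rfl]
    · rw [if_neg hS, ih k]
      have hiff : (k = 0 ∨ (k ∈ S ∧ 1 ≤ k ∧ k ≤ (m : Int)))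
          ↔ (k = 0 ∨ (k ∈ S ∧ 1 ≤ k ∧ k ≤ ((m + 1 : Nat) : Int))) := by
        constructor
        · rintro (h | ⟨h1, h2, h3⟩)
          · exact Or.inl h
          · exact Or.inr ⟨h1, h2, by push_cast; omega⟩
        · rintro (h | ⟨h1, h2, h3⟩)
          · exact Or.inl h
          · refine Or.inr ⟨h1, h2, ?_⟩
            have hkn : k ≠ n := fun he => hS (he ▸ h1)
            rw [hn1] at hkn
            push_cast at h3 ⊢
            omega
      rw [if_congr hiff rfl rfl]

lemma B_val (coins : List Int) (amount : Int) (h0 : 0 ≤ amount) (hpos : ∀ c ∈ coins, 0 < c) :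
    coin_permutation_alt coins amount = Cval coins amount.toNat := by
  unfold coin_permutation_alt
  simp only []
  have hmark := B_mark_all coins amount hpos amount.toNat
    (PySem.Set.ofList [amount])
    (by
      refine ⟨(PySem.Set.mem_ofList _ _).2 (by simp), ?_, ?_⟩
      · intro n hn
        have := (PySem.Set.mem_ofList _ _).1 hn
        simp at this
        omega
      · intro n hn hgt c hc hle
        have := (PySem.Set.mem_ofList _ _).1 hn
        simp at this
        omega)
  rw [show ((amount.toNat : Int)) = amount by omega] at hmark
  obtain ⟨hmem, hbd, hcl⟩ := hmark
  rw [PySem.List.pyRange_one]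
  have hR : (amount + 1 - 1).toNat = amount.toNat := by omega
  rw [hR]
  rw [PySem.Dict.getD_eq_get?_getD]
  rw [B_eval coins amount _ hpos hbd hcl amount.toNat amount]
  rw [if_pos]
  · rfl
  · by_cases h : amount = 0
    · exact Or.inl h
    · exact Or.inr ⟨hmem, by omega, by omega⟩

lemma zero_case (coins : List Int) :
    coin_permutation coins 0 = 1 ∧ coin_permutation_alt coins 0 = 1 := by
  constructor
  · unfold coin_permutation
    norm_num [PySem.List.pyRange_one, PySem.List.pyGetD]
  · unfold coin_permutation_alt
    norm_num [PySem.List.pyRange_one, PySem.List.pyRange_neg_one_eq_nil, PySem.List.pyGetD]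

-- ===== VERDICT (by name: the statement is the Claim_ definition above) =====
theorem coin_permutation_spec : Claim_equal_coin_permutation := by
  intro coins amount _ hpre
  obtain ⟨h0, hor⟩ := hpre
  unfold Spec_coin_permutation
  rcases hor with h | hpos
  · subst h
    rw [(zero_case coins).1, (zero_case coins).2]
  · rw [A_val coins amount h0 hpos, B_val coins amount h0 hpos]
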